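-- pv_equiv track=rewrite | github.com/lasse-cs/AdventOfCode | AOC2024/day19/linen_layout.py | count_possibilities_for_pattern
-- ===== SOURCE A (Python) =====
-- def count_possibilities_for_pattern(
--     towels: list[str], pattern: str, cache: dict[str, int]
-- ) -> int:
--     def _count_possibilities(pattern: str) -> int:
--         if pattern in cache:
--             return cache[pattern]
--
--         if len(pattern) == 0:
--             return 1
--
--         count: int = 0
--         for towel in towels:
--             if pattern[: len(towel)] == towel:
--                 count += _count_possibilities(pattern[len(towel) :])
--         cache[pattern] = count
--         return count
--
--     return _count_possibilities(pattern)
-- ===== SOURCE B (Python) =====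
-- def count_possibilities_for_pattern(
--     towels: list[str], pattern: str, cache: dict[str, int]
-- ) -> int:
--     # Bottom-up DP over suffix lengths (A memoizes a top-down recursion and
--     # mutates `cache`; B only reads `cache` -- equivalence is about the return
--     # value). dp is kept most-recent-first: after handling length L,
--     # dp[0] is the count for the suffix of length L.
--     n = len(pattern)
--     dp = []
--     for L in range(n + 1):
--         suffix = pattern[n - L:]
--         if suffix in cache:
--             v = cache[suffix]
--         elif L == 0:
--             v = 1
--         else:
--             v = 0
--             for t in towels:
--                 if t and len(t) <= L and pattern[n - L:n - L + len(t)] == t: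
--                     v += dp[len(t) - 1]
--         dp.insert(0, v)
--     return dp[0]
-- ===== Notes on version B (the rewrite author's own statement) =====
-- stated objective: alternative
-- what changed: Replaces A's cache-mutating memoized top-down recursion with a bottom-up DP over suffix lengths that keeps a list of suffix counts and only reads the passed-in cache (return value only; B does not replicate A's cache mutation).
import Mathlib
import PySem

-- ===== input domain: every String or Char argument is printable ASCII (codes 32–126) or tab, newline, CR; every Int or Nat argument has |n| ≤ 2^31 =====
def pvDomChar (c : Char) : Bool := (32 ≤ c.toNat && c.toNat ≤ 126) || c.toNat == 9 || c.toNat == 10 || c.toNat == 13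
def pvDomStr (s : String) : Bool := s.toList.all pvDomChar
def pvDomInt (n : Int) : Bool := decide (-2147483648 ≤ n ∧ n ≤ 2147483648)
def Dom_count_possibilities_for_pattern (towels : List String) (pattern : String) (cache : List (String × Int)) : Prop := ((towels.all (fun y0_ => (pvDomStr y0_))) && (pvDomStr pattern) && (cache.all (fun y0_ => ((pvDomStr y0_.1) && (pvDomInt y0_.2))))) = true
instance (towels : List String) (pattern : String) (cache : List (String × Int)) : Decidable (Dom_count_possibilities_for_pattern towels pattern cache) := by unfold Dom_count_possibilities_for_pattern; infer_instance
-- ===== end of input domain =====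

-- B replaces A's cache-mutating memoized top-down recursion by a bottom-up DP
-- over suffix lengths; equivalence is about the RETURN value only (A also
-- mutates the cache argument, B does not).

-- ===== PORT A =====
-- fuel = |pattern| + 1 suffices whenever A terminates (each recursive call
-- strictly shortens the pattern when no towel is empty); fuel 0 is unreachable
-- under Pre_.  State threads the mutable cache.
def pvAgo (towels : List String) : Nat → String → PySem.Dict String Int → Int × PySem.Dict String Int
  | 0, _, cache => (0, cache)
  | fuel+1, pattern, cache =>
    match cache.get? pattern with
    | some v => (v, cache)
    | none =>
      if pattern.toList.length = 0 then (1, cache)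
      else
        let r := towels.foldl (fun (p : Int × PySem.Dict String Int) towel =>
          -- pattern[:len(towel)] == towel
          if pattern.toList.take towel.toList.length = towel.toList then
            let q := pvAgo towels fuel (String.ofList (pattern.toList.drop towel.toList.length)) p.2
            (p.1 + q.1, q.2)
          else p) (0, cache)
        (r.1, r.2.insert pattern r.1)

def count_possibilities_for_pattern (towels : List String) (pattern : String) (cache : List (String × Int)) : Int :=
  (pvAgo towels (pattern.toList.length + 1) pattern (PySem.Dict.mk cache)).1

-- ===== PORT B =====
-- one iteration of Source B's outer loop, at suffix length L; dp is most-recent-first.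
-- pattern[n-L:n-L+len(t)] is (cs.drop (n-L)).take |t| (nonnegative in-range bounds);
-- dp[len(t)-1] is in range whenever the branch executes, so getD is exact.
def pvBstep (towels : List String) (cs : List Char) (n : Nat) (cache : PySem.Dict String Int) (dp : List Int) (L : Nat) : List Int :=
  let v :=
    match cache.get? (String.ofList (cs.drop (n - L))) with
    | some v => v
    | none =>
      if L = 0 then (1 : Int)
      else towels.foldl (fun v t =>
        if t.toList ≠ [] ∧ t.toList.length ≤ L ∧ (cs.drop (n - L)).take t.toList.length = t.toList
        then v + dp.getD (t.toList.length - 1) 0 else v) 0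
  v :: dp

def count_possibilities_for_pattern_alt (towels : List String) (pattern : String) (cache : List (String × Int)) : Int :=
  let cs := pattern.toList
  let n := cs.length
  let dp := (List.range (n + 1)).foldl (pvBstep towels cs n (PySem.Dict.mk cache)) []
  dp.getD 0 0

-- ===== PRECONDITION & SPEC =====
-- Pre_ excludes exactly the inputs on which A never returns (RecursionError):
-- towels containing the empty string while pattern is nonempty and not a cache key.
def Pre_count_possibilities_for_pattern (towels : List String) (pattern : String) (cache : List (String × Int)) : Prop :=
  pattern = "" ∨ ((PySem.Dict.mk cache).get? pattern).isSome ∨ "" ∉ towels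
instance (towels : List String) (pattern : String) (cache : List (String × Int)) : Decidable (Pre_count_possibilities_for_pattern towels pattern cache) := by unfold Pre_count_possibilities_for_pattern; infer_instance

def pvWitness_count_possibilities_for_pattern : List String × String × (List (String × Int)) :=
  (["r", "g", "rg"], "rg", [])

def Spec_count_possibilities_for_pattern (towels : List String) (pattern : String) (cache : List (String × Int)) (out : Int) : Prop := out = count_possibilities_for_pattern_alt towels pattern cache
instance (towels : List String) (pattern : String) (cache : List (String × Int)) (out : Int) : Decidable (Spec_count_possibilities_for_pattern towels pattern cache out) := by unfold Spec_count_possibilities_for_pattern; infer_instance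

-- ===== CLAIM (what is proved, stated in full; the proofs are below) =====
def Claim_equal_count_possibilities_for_pattern : Prop := ∀ (towels : List String) (pattern : String) (cache : List (String × Int)), Dom_count_possibilities_for_pattern towels pattern cache → Pre_count_possibilities_for_pattern towels pattern cache → Spec_count_possibilities_for_pattern towels pattern cache (count_possibilities_for_pattern towels pattern cache)
-- ===== LEMMAS AND PROOFS =====

-- mathematical count for the suffix of length L, relative to the INITIAL cache
def pvG (towels : List String) (cs : List Char) (cache : PySem.Dict String Int) : Nat → Int
  | L =>
    match cache.get? (String.ofList (cs.drop (cs.length - L))) with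
    | some v => v
    | none =>
      if L = 0 then (1 : Int)
      else (towels.map (fun t =>
          if h : t.toList ≠ [] ∧ t.toList.length ≤ L ∧ (cs.drop (cs.length - L)).take t.toList.length = t.toList
          then pvG towels cs cache (L - t.toList.length) else 0)).sum
  termination_by L => L
  decreasing_by
    have h1 : 0 < t.toList.length := List.length_pos_of_ne_nil h.1
    omega

theorem pvG_unfold (towels : List String) (cs : List Char) (cache : PySem.Dict String Int) (L : Nat) :
    pvG towels cs cache L =
      match cache.get? (String.ofList (cs.drop (cs.length - L))) with
      | some v => v
      | none =>
        if L = 0 then (1 : Int)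
        else (towels.map (fun t =>
            if t.toList ≠ [] ∧ t.toList.length ≤ L ∧ (cs.drop (cs.length - L)).take t.toList.length = t.toList
            then pvG towels cs cache (L - t.toList.length) else 0)).sum := by
  rw [pvG]
  simp only [dite_eq_ite]

theorem pvRevRange_getD (f : Nat → Int) (m j : Nat) (h : j < m) :
    (((List.range m).reverse).map f).getD j 0 = f (m - 1 - j) := by
  simp [List.getD, h]

-- B's fold builds exactly [pvG (m-1), …, pvG 0]
theorem pvB_dp (towels : List String) (cs : List Char) (cache : PySem.Dict String Int) (m : Nat) :
    (List.range m).foldl (pvBstep towels cs cs.length cache) []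
      = ((List.range m).reverse).map (pvG towels cs cache) := by
  induction m with
  | zero => simp
  | succ m ih =>
    rw [List.range_succ, List.foldl_append, List.foldl_cons, List.foldl_nil, ih,
        List.reverse_append, List.reverse_cons, List.reverse_nil, List.nil_append,
        List.map_append, List.map_cons, List.map_nil, List.singleton_append]
    show pvBstep towels cs cs.length cache (((List.range m).reverse).map (pvG towels cs cache)) m
        = pvG towels cs cache m :: ((List.range m).reverse).map (pvG towels cs cache)
    unfold pvBstep
    rw [pvG_unfold]
    cases hget : cache.get? (String.ofList (cs.drop (cs.length - m))) with
    | some v => simp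
    | none =>
      simp only
      by_cases hm : m = 0
      · simp [hm]
      · rw [if_neg hm, if_neg hm]
        have hbody : (fun (v : Int) (t : String) =>
            if t.toList ≠ [] ∧ t.toList.length ≤ m ∧ (cs.drop (cs.length - m)).take t.toList.length = t.toList
            then v + (((List.range m).reverse).map (pvG towels cs cache)).getD (t.toList.length - 1) 0 else v)
          = (fun (v : Int) (t : String) => v +
            (if t.toList ≠ [] ∧ t.toList.length ≤ m ∧ (cs.drop (cs.length - m)).take t.toList.length = t.toList
            then (((List.range m).reverse).map (pvG towels cs cache)).getD (t.toList.length - 1) 0 else 0)) := by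
          funext v t; split_ifs <;> simp
        rw [hbody, PySem.List.foldl_add, zero_add]
        have hmap : ∀ t ∈ towels,
            (if t.toList ≠ [] ∧ t.toList.length ≤ m ∧ (cs.drop (cs.length - m)).take t.toList.length = t.toList
             then (((List.range m).reverse).map (pvG towels cs cache)).getD (t.toList.length - 1) 0 else 0)
            = (if t.toList ≠ [] ∧ t.toList.length ≤ m ∧ (cs.drop (cs.length - m)).take t.toList.length = t.toList
               then pvG towels cs cache (m - t.toList.length) else (0 : Int)) := by
          intro t _
          split_ifs with hc
          · have h1 : 0 < t.toList.length := List.length_pos_of_ne_nil hc.1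
            rw [pvRevRange_getD _ _ _ (by omega)]
            congr 1
            omega
          · rfl
        rw [List.map_congr_left hmap]

theorem pvB_eq_pvG (towels : List String) (pattern : String) (cache : List (String × Int)) :
    count_possibilities_for_pattern_alt towels pattern cache
      = pvG towels pattern.toList (PySem.Dict.mk cache) pattern.toList.length := by
  show ((List.range (pattern.toList.length + 1)).foldl
      (pvBstep towels pattern.toList pattern.toList.length (PySem.Dict.mk cache)) []).getD 0 0 = _
  rw [pvB_dp]
  rw [List.range_succ, List.reverse_append, List.reverse_cons, List.reverse_nil,
      List.nil_append, List.map_append, List.map_cons, List.map_nil, List.singleton_append]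
  simp [List.getD]

-- the invariant A's cache satisfies during the run: it only extends the initial
-- cache, and any entry at a suffix key carries that suffix's pvG value
def pvInv (towels : List String) (cs : List Char) (cache0 c : PySem.Dict String Int) : Prop :=
  (∀ s, c.get? s = none → cache0.get? s = none) ∧
  (∀ L v, L ≤ cs.length → c.get? (String.ofList (cs.drop (cs.length - L))) = some v →
    v = pvG towels cs cache0 L)

theorem pvInv_init (towels : List String) (cs : List Char) (cache0 : PySem.Dict String Int) :
    pvInv towels cs cache0 cache0 := by
  refine ⟨fun _ h => h, fun L v _ h => ?_⟩
  rw [pvG_unfold, h]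

theorem pvInv_insert (towels : List String) (cs : List Char) (cache0 c : PySem.Dict String Int)
    (L : Nat) (hL : L ≤ cs.length) (hInv : pvInv towels cs cache0 c) :
    pvInv towels cs cache0
      (c.insert (String.ofList (cs.drop (cs.length - L))) (pvG towels cs cache0 L)) := by
  constructor
  · intro s hs
    rw [PySem.Dict.get?_insert] at hs
    split_ifs at hs
    exact hInv.1 s hs
  · intro L' v hL' hkey
    rw [PySem.Dict.get?_insert] at hkey
    split_ifs at hkey with heq
    · have hlist : cs.drop (cs.length - L') = cs.drop (cs.length - L) := by
        have := congrArg String.toList heq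
        simpa using this
      have hlen := congrArg List.length hlist
      simp only [List.length_drop] at hlen
      have : L' = L := by omega
      subst this
      injection hkey with h
      omega
    · exact hInv.2 L' v hL' hkey

theorem pvA_main (towels : List String) (cs : List Char) (cache0 : PySem.Dict String Int)
    (hE : "" ∉ towels) :
    ∀ fuel L (c : PySem.Dict String Int), L ≤ cs.length → L < fuel → pvInv towels cs cache0 c →
      (pvAgo towels fuel (String.ofList (cs.drop (cs.length - L))) c).1 = pvG towels cs cache0 L ∧
      pvInv towels cs cache0 (pvAgo towels fuel (String.ofList (cs.drop (cs.length - L))) c).2 := by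
  intro fuel
  induction fuel with
  | zero => intro L c _ h _; omega
  | succ fuel ih =>
    intro L c hL hf hInv
    simp only [pvAgo]
    cases hget : c.get? (String.ofList (cs.drop (cs.length - L))) with
    | some v =>
      dsimp only
      exact ⟨hInv.2 L v hL hget, hInv⟩
    | none =>
      have h0 : cache0.get? (String.ofList (cs.drop (cs.length - L))) = none :=
        hInv.1 _ hget
      simp only [String.toList_ofList, List.length_drop]
      by_cases hL0 : L = 0
      · subst hL0
        refine ⟨?_, by simpa using hInv⟩
        rw [pvG_unfold, h0]
        simp
      · rw [if_neg (by omega)]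
        -- the inner fold over the towels
        have fold : ∀ (ts : List String), (∀ t ∈ ts, t ∈ towels) →
            ∀ (acc : Int) (c' : PySem.Dict String Int), pvInv towels cs cache0 c' →
            (ts.foldl (fun (p : Int × PySem.Dict String Int) towel =>
              if (cs.drop (cs.length - L)).take towel.toList.length = towel.toList then
                let q := pvAgo towels fuel (String.ofList ((cs.drop (cs.length - L)).drop towel.toList.length)) p.2
                (p.1 + q.1, q.2)
              else p) (acc, c')).1
              = acc + (ts.map (fun t =>
                  if t.toList ≠ [] ∧ t.toList.length ≤ L ∧ (cs.drop (cs.length - L)).take t.toList.length = t.toList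
                  then pvG towels cs cache0 (L - t.toList.length) else 0)).sum ∧
            pvInv towels cs cache0
              (ts.foldl (fun (p : Int × PySem.Dict String Int) towel =>
              if (cs.drop (cs.length - L)).take towel.toList.length = towel.toList then
                let q := pvAgo towels fuel (String.ofList ((cs.drop (cs.length - L)).drop towel.toList.length)) p.2
                (p.1 + q.1, q.2)
              else p) (acc, c')).2 := by
          intro ts
          induction ts with
          | nil => intro _ acc c' hc'; exact ⟨by simp, hc'⟩
          | cons t tl iht =>
            intro hmem acc c' hc'
            have htNe : t.toList ≠ [] := by
              have ht : t ≠ "" := fun h => hE (h ▸ hmem t (by simp))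
              simpa [String.toList_eq_nil_iff] using ht
            simp only [List.foldl_cons, List.map_cons, List.sum_cons]
            by_cases hA : (cs.drop (cs.length - L)).take t.toList.length = t.toList
            · have hlen : t.toList.length ≤ L := by
                have := congrArg List.length hA
                simp only [List.length_take, List.length_drop] at this
                omega
              have h1 : 0 < t.toList.length := List.length_pos_of_ne_nil htNe
              have hdd : (cs.drop (cs.length - L)).drop t.toList.length
                  = cs.drop (cs.length - (L - t.toList.length)) := by
                rw [List.drop_drop]
                congr 1
                omega
              rw [if_pos hA]
              simp only [hdd]
              obtain ⟨hq1, hq2⟩ := ih (L - t.toList.length) c' (by omega) (by omega) hc'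
              obtain ⟨hr1, hr2⟩ := iht (fun x hx => hmem x (by simp [hx]))
                (acc + (pvAgo towels fuel (String.ofList (cs.drop (cs.length - (L - t.toList.length)))) c').1)
                (pvAgo towels fuel (String.ofList (cs.drop (cs.length - (L - t.toList.length)))) c').2 hq2
              refine ⟨?_, hr2⟩
              rw [hr1, hq1, if_pos ⟨htNe, hlen, hA⟩]
              ring
            · rw [if_neg hA, if_neg (fun h => hA h.2.2)]
              obtain ⟨hr1, hr2⟩ := iht (fun x hx => hmem x (by simp [hx])) acc c' hc'
              exact ⟨by rw [hr1]; ring, hr2⟩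
        obtain ⟨hr1, hr2⟩ := fold towels (fun _ h => h) 0 c hInv
        have hsum : (towels.foldl (fun (p : Int × PySem.Dict String Int) towel =>
              if (cs.drop (cs.length - L)).take towel.toList.length = towel.toList then
                let q := pvAgo towels fuel (String.ofList ((cs.drop (cs.length - L)).drop towel.toList.length)) p.2
                (p.1 + q.1, q.2)
              else p) (0, c)).1 = pvG towels cs cache0 L := by
          rw [hr1, zero_add, pvG_unfold, h0, if_neg hL0]
        refine ⟨hsum, ?_⟩
        rw [hsum]
        exact pvInv_insert towels cs cache0 _ L hL hr2

-- ===== VERDICT (by name: the statement is the Claim_ definition above) =====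
theorem count_possibilities_for_pattern_spec : Claim_equal_count_possibilities_for_pattern := by
  intro towels pattern cache _ hpre
  unfold Spec_count_possibilities_for_pattern
  rw [pvB_eq_pvG]
  rcases hpre with hp | hp | hp
  · subst hp
    show (pvAgo towels 1 "" (PySem.Dict.mk cache)).1 = _
    simp only [pvAgo]
    rw [pvG_unfold]
    have : String.ofList (("".toList).drop ("".toList.length - "".toList.length)) = "" := by
      simp
    rw [this]
    cases hget : (PySem.Dict.mk cache).get? "" <;> simp
  · obtain ⟨v, hv⟩ := Option.isSome_iff_exists.mp hp
    show (pvAgo towels (pattern.toList.length + 1) pattern (PySem.Dict.mk cache)).1 = _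
    simp only [pvAgo]
    rw [pvG_unfold]
    rw [Nat.sub_self, List.drop_zero, String.ofList_toList, hv]
  · have := (pvA_main towels pattern.toList (PySem.Dict.mk cache) hp
      (pattern.toList.length + 1) pattern.toList.length (PySem.Dict.mk cache)
      (le_refl _) (by omega) (pvInv_init _ _ _)).1
    rw [Nat.sub_self, List.drop_zero, String.ofList_toList] at this
    exact this
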